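-- pv_equiv track=rewrite | github.com/Isaadqurashi/experimental | weekly/weekly.py | bookletPermutation
-- ===== SOURCE A (Python) =====
-- def bookletPermutation(pages, fill, fc, bc):
--     while (len(pages) + 2) % 4 != 0:
--         pages.append(fill) # fill to get to mod 4 w/covers
--     tmp = []
--     tmp.append(fc)
--     for pi, p in enumerate(pages):
--         phase = pi % 4
--         if phase == 0 or phase == 3:
--             tmp.append(pages.pop(0)) # front
--         elif phase == 1 or phase == 2:
--             tmp.append(pages.pop()) # back
--     tmp.append(bc)
--     return tmp
-- ===== SOURCE B (Python) =====
-- def bookletPermutation(pages, fill, fc, bc):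
--     # NOTE: unlike the original, this does not mutate `pages`; return value is identical.
--     padded = pages + [fill] * ((-(len(pages) + 2)) % 4)
--     half = len(padded) // 2
--     out = [fc]
--     i, j = 0, len(padded) - 1
--     for step in range(half):
--         if step % 4 in (0, 3):
--             out.append(padded[i])
--             i += 1
--         else:
--             out.append(padded[j])
--             j -= 1
--     out.append(bc)
--     return out
-- ===== Notes on version B (the rewrite author's own statement) =====
-- stated objective: faster
-- what changed: Replaces A's quadratic walk that repeatedly pops from the front/back of the shrinking list (while enumerating it) with a single O(n) two-pointer pass over the padded list indexed by step phase; B also does not mutate `pages` (return value is identical).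
import Mathlib
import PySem

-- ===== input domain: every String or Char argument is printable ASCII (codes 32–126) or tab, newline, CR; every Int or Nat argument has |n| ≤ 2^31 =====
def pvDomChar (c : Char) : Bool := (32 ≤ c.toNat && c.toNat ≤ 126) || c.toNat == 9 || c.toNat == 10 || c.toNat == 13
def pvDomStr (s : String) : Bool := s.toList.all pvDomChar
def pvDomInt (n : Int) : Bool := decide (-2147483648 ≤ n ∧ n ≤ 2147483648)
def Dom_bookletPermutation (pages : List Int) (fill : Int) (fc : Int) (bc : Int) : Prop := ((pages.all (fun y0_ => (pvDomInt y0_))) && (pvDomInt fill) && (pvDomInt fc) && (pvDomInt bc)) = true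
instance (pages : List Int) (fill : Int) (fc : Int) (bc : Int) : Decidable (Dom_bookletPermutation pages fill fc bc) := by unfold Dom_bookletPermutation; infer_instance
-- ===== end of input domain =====

-- B replaces A's quadratic pop(0)-driven walk over a shrinking list by an O(n) two-pointer
-- index walk over the padded list; equivalence is about the RETURN value only (A mutates
-- `pages` in place, B does not).

-- ===== PORT A =====
-- termination lemma cited by padLoopA's decreasing_by
theorem pad_dec (n : Nat) (h : (n + 2) % 4 ≠ 0) :
    (4 - ((n + 1) + 2) % 4) % 4 < (4 - (n + 2) % 4) % 4 := by
  have hb : (n + 2) % 4 < 4 := Nat.mod_lt _ (by decide)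
  have key : ∀ r : Fin 4, r.val ≠ 0 → (4 - (r.val + 1) % 4) % 4 < (4 - r.val) % 4 := by decide
  have e : ((n + 1) + 2) % 4 = ((n + 2) % 4 + 1) % 4 := by
    rw [Nat.add_right_comm n 1 2, Nat.add_mod (n + 2) 1 4]
  rw [e]
  exact key ⟨(n + 2) % 4, hb⟩ h

-- while (len(pages) + 2) % 4 != 0: pages.append(fill)
def padLoopA (fill : Int) (pages : List Int) : List Int :=
  if _h : (pages.length + 2) % 4 ≠ 0 then padLoopA fill (pages ++ [fill]) else pages
termination_by (4 - (pages.length + 2) % 4) % 4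
decreasing_by
  simp only [List.length_append, List.length_singleton]
  exact pad_dec pages.length _h

-- for pi, p in enumerate(pages): … pages.pop(0) / pages.pop() …
-- Python iterates with a cursor pi over the list being mutated: the loop runs while
-- pi < len(current list); pop(0)/pop() via PySem.List.pop? (none is unreachable here).
def loopA (cur : List Int) (pi : Nat) (tmp : List Int) : List Int :=
  if pi < cur.length then
    if pi % 4 = 0 ∨ pi % 4 = 3 then
      match h : PySem.List.pop? cur 0 with
      | some (x, rest) => loopA rest (pi + 1) (tmp ++ [x])
      | none => tmp
    else
      match h : PySem.List.pop? cur (-1) with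
      | some (x, rest) => loopA rest (pi + 1) (tmp ++ [x])
      | none => tmp
  else tmp
termination_by cur.length
decreasing_by
  · have := PySem.List.length_of_pop?_eq_some cur h; simp at this; omega
  · have := PySem.List.length_of_pop?_eq_some cur h; simp at this; omega

def bookletPermutation (pages : List Int) (fill : Int) (fc : Int) (bc : Int) : List Int :=
  let padded := padLoopA fill pages
  loopA padded 0 [fc] ++ [bc]

-- ===== PORT B =====
-- one step of B's two-pointer loop: state (i, j, out)
def stepB (padded : List Int) (st : Nat × Nat × List Int) (step : Nat) : Nat × Nat × List Int :=
  if step % 4 = 0 ∨ step % 4 = 3 then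
    (st.1 + 1, st.2.1, st.2.2 ++ [padded.getD st.1 0])   -- padded[i] (i always in range)
  else
    (st.1, st.2.1 - 1, st.2.2 ++ [padded.getD st.2.1 0]) -- padded[j] (j always in range)

def bookletPermutation_alt (pages : List Int) (fill : Int) (fc : Int) (bc : Int) : List Int :=
  let padded := pages ++ PySem.List.pyRepeat [fill] (PySem.Int.mod (-((pages.length : Int) + 2)) 4)
  let half := padded.length / 2
  let res := (List.range half).foldl (stepB padded) (0, padded.length - 1, [fc])
  res.2.2 ++ [bc]

-- ===== PRECONDITION & SPEC =====
def Spec_bookletPermutation (pages : List Int) (fill : Int) (fc : Int) (bc : Int) (out : List Int) : Prop := out = bookletPermutation_alt pages fill fc bc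
instance (pages : List Int) (fill : Int) (fc : Int) (bc : Int) (out : List Int) : Decidable (Spec_bookletPermutation pages fill fc bc out) := by unfold Spec_bookletPermutation; infer_instance

-- ===== CLAIM (what is proved, stated in full; the proofs are below) =====
def Claim_equal_bookletPermutation : Prop := ∀ (pages : List Int) (fill : Int) (fc : Int) (bc : Int), Dom_bookletPermutation pages fill fc bc → Spec_bookletPermutation pages fill fc bc (bookletPermutation pages fill fc bc)

-- ===== LEMMAS AND PROOFS =====

-- A's padding loop appends exactly (4 - (len+2)%4) % 4 copies of fill
theorem padLoopA_eq (fill : Int) (pages : List Int) :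
    padLoopA fill pages = pages ++ List.replicate ((4 - (pages.length + 2) % 4) % 4) fill := by
  induction pages using padLoopA.induct fill with
  | case1 xs h ih =>
    rw [padLoopA, dif_pos h, ih]
    have hk : (4 - ((xs ++ [fill]).length + 2) % 4) % 4 + 1
        = (4 - (xs.length + 2) % 4) % 4 := by
      simp only [List.length_append, List.length_singleton]; omega
    rw [← hk, List.append_assoc]
    simp [List.replicate_succ]
  | case2 xs h =>
    rw [padLoopA, dif_neg h]
    have : (4 - (xs.length + 2) % 4) % 4 = 0 := by omega
    simp [this]

-- the pure value of A's loop (no accumulator)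
def fA (cur : List Int) (pi : Nat) : List Int :=
  if pi < cur.length then
    if pi % 4 = 0 ∨ pi % 4 = 3 then
      cur.headD 0 :: fA cur.tail (pi + 1)
    else
      cur.getLastD 0 :: fA cur.dropLast (pi + 1)
  else []
termination_by cur.length
decreasing_by
  · simp only [List.length_tail]; omega
  · simp only [List.length_dropLast]; omega

theorem fA_stop (cur : List Int) (pi : Nat) (h : ¬ pi < cur.length) : fA cur pi = [] := by
  rw [fA, if_neg h]

theorem fA_front (c : Int) (cs : List Int) (pi : Nat) (hph : pi % 4 = 0 ∨ pi % 4 = 3) :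
    fA (c :: cs) pi = if pi < cs.length + 1 then c :: fA cs (pi + 1) else [] := by
  rw [fA]
  simp [hph]

theorem fA_back (ys : List Int) (y : Int) (pi : Nat) (hph : ¬ (pi % 4 = 0 ∨ pi % 4 = 3)) :
    fA (ys ++ [y]) pi = if pi < ys.length + 1 then y :: fA ys (pi + 1) else [] := by
  rw [fA]
  simp [hph]

theorem loopA_eq_fA (cur : List Int) (pi : Nat) (tmp : List Int) :
    loopA cur pi tmp = tmp ++ fA cur pi := by
  rw [loopA]
  by_cases hlt : pi < cur.length
  · simp only [if_pos hlt]
    by_cases hph : pi % 4 = 0 ∨ pi % 4 = 3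
    · simp only [if_pos hph]
      obtain ⟨c, cs, rfl⟩ : ∃ c cs, cur = c :: cs := by
        cases cur with
        | nil => simp at hlt
        | cons c cs => exact ⟨c, cs, rfl⟩
      rw [PySem.List.pop?_zero_cons]
      show loopA cs (pi + 1) (tmp ++ [c]) = tmp ++ fA (c :: cs) pi
      rw [loopA_eq_fA cs (pi + 1) (tmp ++ [c])]
      rw [fA_front c cs pi hph, if_pos (by simpa using hlt)]
      simp
    · simp only [if_neg hph]
      obtain ⟨ys, y, rfl⟩ : ∃ ys y, cur = ys ++ [y] := by
        rcases List.eq_nil_or_concat cur with rfl | ⟨ys, y, hc⟩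
        · simp at hlt
        · exact ⟨ys, y, by simpa using hc⟩
      rw [PySem.List.pop?_last]
      show loopA ys (pi + 1) (tmp ++ [y]) = tmp ++ fA (ys ++ [y]) pi
      rw [loopA_eq_fA ys (pi + 1) (tmp ++ [y])]
      rw [fA_back ys y pi hph, if_pos (by simpa using hlt)]
      simp
  · rw [fA_stop cur pi hlt]
    simp [hlt]
termination_by cur.length
decreasing_by
  all_goals simp_all

theorem getD_append_mid {α : Type} [Inhabited α] (pre rest : List α) (d : α) :
    (pre ++ rest).getD pre.length d = rest.getD 0 d := by
  induction pre with
  | nil => simp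
  | cons a as ih => simpa using ih

-- the two-pointer fold consumes the middle segment exactly as fA does
theorem fold_stepB_eq (padded : List Int) (t : Nat) :
    ∀ (pre cur post : List Int) (s j : ℕ) (acc : List Int) (half : ℕ),
      padded = pre ++ cur ++ post →
      pre.length + cur.length = j + 1 →
      s + t = half → cur.length + s = 2 * half →
      ((List.range' s t).foldl (stepB padded) (pre.length, j, acc)).2.2 = acc ++ fA cur s := by
  induction t with
  | zero =>
    intro pre cur post s j acc half hpad hj hs hlen
    rw [fA_stop cur s (by omega)]
    simp
  | succ t ih =>
    intro pre cur post s j acc half hpad hj hs hlen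
    have hcur : s < cur.length := by omega
    rw [List.range'_succ, List.foldl_cons]
    by_cases hph : s % 4 = 0 ∨ s % 4 = 3
    · obtain ⟨c, cs, rfl⟩ : ∃ c cs, cur = c :: cs := by
        cases cur with
        | nil => simp at hcur
        | cons c cs => exact ⟨c, cs, rfl⟩
      have hget : padded.getD pre.length 0 = c := by
        rw [hpad, List.append_assoc, getD_append_mid]
        simp
      rw [stepB, if_pos hph]
      simp only [hget]
      have heq := ih (pre ++ [c]) cs post (s + 1) j (acc ++ [c]) half
        (by rw [hpad]; simp) (by simp at hj ⊢; omega) (by omega)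
        (by simp at hlen ⊢; omega)
      simp only [List.length_append, List.length_singleton] at heq
      rw [heq]
      rw [fA_front c cs s hph, if_pos (by simpa using hcur)]
      simp
    · obtain ⟨ys, y, rfl⟩ : ∃ ys y, cur = ys ++ [y] := by
        rcases List.eq_nil_or_concat cur with rfl | ⟨ys, y, hc⟩
        · simp at hcur
        · exact ⟨ys, y, by simpa using hc⟩
      have hyslen : ys.length ≥ 1 := by simp at hlen; omega
      have hjval : j = pre.length + ys.length := by simp at hj; omega
      have hget : padded.getD j 0 = y := by
        have hsplit : padded = (pre ++ ys) ++ ([y] ++ post) := by rw [hpad]; simp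
        rw [hsplit, hjval, show pre.length + ys.length = (pre ++ ys).length by simp,
          getD_append_mid]
        simp
      rw [stepB, if_neg hph]
      simp only [hget]
      have heq := ih pre ys (y :: post) (s + 1) (j - 1) (acc ++ [y]) half
        (by rw [hpad]; simp) (by simp at hj; omega) (by omega)
        (by simp at hlen ⊢; omega)
      rw [heq]
      rw [fA_back ys y s hph, if_pos (by simpa using hcur)]
      simp

theorem padded_eq (fill : Int) (pages : List Int) :
    pages ++ PySem.List.pyRepeat [fill] (PySem.Int.mod (-((pages.length : Int) + 2)) 4)
      = padLoopA fill pages := by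
  rw [padLoopA_eq, PySem.List.pyRepeat_singleton,
    PySem.Int.mod_eq_emod_of_pos (by norm_num)]
  congr 1
  congr 1
  have h4 : ((pages.length : Int) % 4).toNat = pages.length % 4 := by omega
  omega

-- ===== VERDICT (by name: the statement is the Claim_ definition above) =====
theorem bookletPermutation_spec : Claim_equal_bookletPermutation := by
  intro pages fill fc bc _
  unfold Spec_bookletPermutation bookletPermutation bookletPermutation_alt
  simp only [padded_eq]
  have hmod : (padLoopA fill pages).length % 4 = 2 := by
    rw [padLoopA_eq]; simp only [List.length_append, List.length_replicate]; omega
  rw [loopA_eq_fA]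
  have heq := fold_stepB_eq (padLoopA fill pages) ((padLoopA fill pages).length / 2) []
    (padLoopA fill pages) [] 0 ((padLoopA fill pages).length - 1) [fc]
    ((padLoopA fill pages).length / 2)
    (by simp) (by simp; omega) (by omega) (by omega)
  simp only [List.length_nil] at heq
  rw [List.range_eq_range', heq]
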